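-- pv_equiv track=rewrite | github.com/Amauna/ScriptTools | tools/date_time_utilities/date_format_converter.py | _strftime_to_signature
-- ===== SOURCE A (Python) =====
-- from typing import Any, Dict, List, Optional, Tuple
--
-- FORMAT_SPEC_MAP: Dict[str, str] = {
--     "%Y": "YYYY",
--     "%y": "YY",
--     "%m": "MM",
--     "%-m": "M",
--     "%d": "DD",
--     "%-d": "D",
--     "%H": "HH",
--     "%I": "hh",
--     "%M": "mm",
--     "%S": "ss",
--     "%b": "MMM",
--     "%B": "MMMM",
--     "%a": "ddd",
--     "%A": "dddd",
-- }
--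
-- def _strftime_to_signature(fmt: str) -> str:
--     signature_parts: List[str] = []
--     i = 0
--     length = len(fmt)
--     while i < length:
--         if fmt[i] == "%":
--             token = fmt[i : i + 2]
--             replacement = FORMAT_SPEC_MAP.get(token)
--             if replacement is None and i + 2 < length and fmt[i + 1] == "-":
--                 token = fmt[i : i + 3]
--                 replacement = FORMAT_SPEC_MAP.get(token)
--                 if replacement is not None:
--                     signature_parts.append(replacement)
--                     i += 3
--                     continue
--             if replacement is not None:
--                 signature_parts.append(replacement)
--             elif i + 1 < length:
--                 signature_parts.append(fmt[i + 1])
--             i += 2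
--         else:
--             signature_parts.append(fmt[i])
--             i += 1
--     return "".join(signature_parts).strip()
-- ===== SOURCE B (Python) =====
-- import re
-- from typing import Dict
--
-- FORMAT_SPEC_MAP: Dict[str, str] = {
--     "%Y": "YYYY",
--     "%y": "YY",
--     "%m": "MM",
--     "%-m": "M",
--     "%d": "DD",
--     "%-d": "D",
--     "%H": "HH",
--     "%I": "hh",
--     "%M": "mm",
--     "%S": "ss",
--     "%b": "MMM",
--     "%B": "MMMM",
--     "%a": "ddd",
--     "%A": "dddd",
-- }
--
-- _TOKEN_RE = re.compile(
--     r"%-m|%-d|%Y|%y|%m|%d|%H|%I|%M|%S|%b|%B|%a|%A|%(.)|%\Z", re.DOTALL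
-- )
--
--
-- def _repl(m: "re.Match[str]") -> str:
--     mapped = FORMAT_SPEC_MAP.get(m.group(0))
--     if mapped is not None:
--         return mapped
--     if m.group(1) is not None:
--         return m.group(1)
--     return ""
--
--
-- def _strftime_to_signature(fmt: str) -> str:
--     return _TOKEN_RE.sub(_repl, fmt).strip()
-- ===== Notes on version B (the rewrite author's own statement) =====
-- stated objective: idiomatic
-- what changed: Replaces the hand-written index-walking while-loop with dict lookups and manual i+=k stepping by a single re.sub over an ordered regex alternation (three-char tokens first, then the twelve two-char tokens, then a percent capturing the following character, then a trailing bare percent) with a replacement callback, followed by the same strip.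
import Mathlib
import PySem

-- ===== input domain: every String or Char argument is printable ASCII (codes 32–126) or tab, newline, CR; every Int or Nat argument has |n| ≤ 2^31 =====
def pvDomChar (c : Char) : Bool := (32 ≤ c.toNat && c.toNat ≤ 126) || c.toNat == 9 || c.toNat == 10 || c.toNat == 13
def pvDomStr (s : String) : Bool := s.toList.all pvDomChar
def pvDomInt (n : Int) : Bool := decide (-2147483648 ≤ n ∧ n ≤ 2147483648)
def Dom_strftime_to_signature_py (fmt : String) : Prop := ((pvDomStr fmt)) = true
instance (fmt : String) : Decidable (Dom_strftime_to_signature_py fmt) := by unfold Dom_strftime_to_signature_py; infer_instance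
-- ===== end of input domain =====

-- B replaces A's hand-rolled index-walking while-loop by a single regex substitution with
-- an ordered token alternation and a replacement callback — objective: idiomatic.

-- ===== PORT A =====
-- FORMAT_SPEC_MAP, the module-level dict
def fmtSpecMap : PySem.Dict String String := PySem.Dict.ofList
  [("%Y", "YYYY"), ("%y", "YY"), ("%m", "MM"), ("%-m", "M"),
   ("%d", "DD"), ("%-d", "D"), ("%H", "HH"), ("%I", "hh"),
   ("%M", "mm"), ("%S", "ss"), ("%b", "MMM"), ("%B", "MMMM"),
   ("%a", "ddd"), ("%A", "dddd")]

-- A's while-loop over the index i, as recursion on the remaining suffix fmt[i:];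
-- fmt[i:i+2] / fmt[i:i+3] are the takes, the i += k steps are the drops.
def loopA : List Char → List String
  | [] => []
  | c :: rest =>
    if c = '%' then
      -- token = fmt[i:i+2]; replacement = FORMAT_SPEC_MAP.get(token)
      match PySem.Dict.get? fmtSpecMap (String.ofList (c :: rest.take 1)) with
      | some r => r :: loopA (rest.drop 1)              -- append, i += 2
      | none =>
        -- replacement is None and i + 2 < length and fmt[i+1] == "-"
        if 1 < rest.length ∧ rest.head? = some '-' then
          match PySem.Dict.get? fmtSpecMap (String.ofList (c :: rest.take 2)) with
          | some r => r :: loopA (rest.drop 2)          -- append, i += 3, continue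
          | none =>
            match rest with                             -- elif i + 1 < length: append fmt[i+1]
            | [] => []
            | y :: r2 => String.singleton y :: loopA r2 -- i += 2
        else
          match rest with
          | [] => []                                    -- lone '%' at the end: nothing appended
          | y :: r2 => String.singleton y :: loopA r2   -- i += 2
    else
      String.singleton c :: loopA rest                  -- append fmt[i], i += 1
  termination_by l => l.length
  decreasing_by all_goals simp [List.length_drop]

-- "".join(signature_parts).strip()
def strftime_to_signature_py (fmt : String) : String :=
  PySem.Str.strip (PySem.Str.join "" (loopA fmt.toList))

-- ===== PORT B =====
-- the regex engine scanning fmt left to right with the ordered alternation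
-- %-m|%-d|%Y|%y|%m|%d|%H|%I|%M|%S|%b|%B|%a|%A|%(.)|%\Z  (DOTALL), each match replaced
-- by _repl's value: mapped token / captured char / "" for a trailing lone '%'
def subB : List Char → List Char
  | '%' :: '-' :: 'm' :: rest => 'M' :: subB rest
  | '%' :: '-' :: 'd' :: rest => 'D' :: subB rest
  | '%' :: 'Y' :: rest => 'Y' :: 'Y' :: 'Y' :: 'Y' :: subB rest
  | '%' :: 'y' :: rest => 'Y' :: 'Y' :: subB rest
  | '%' :: 'm' :: rest => 'M' :: 'M' :: subB rest
  | '%' :: 'd' :: rest => 'D' :: 'D' :: subB rest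
  | '%' :: 'H' :: rest => 'H' :: 'H' :: subB rest
  | '%' :: 'I' :: rest => 'h' :: 'h' :: subB rest
  | '%' :: 'M' :: rest => 'm' :: 'm' :: subB rest
  | '%' :: 'S' :: rest => 's' :: 's' :: subB rest
  | '%' :: 'b' :: rest => 'M' :: 'M' :: 'M' :: subB rest
  | '%' :: 'B' :: rest => 'M' :: 'M' :: 'M' :: 'M' :: subB rest
  | '%' :: 'a' :: rest => 'd' :: 'd' :: 'd' :: subB rest
  | '%' :: 'A' :: rest => 'd' :: 'd' :: 'd' :: 'd' :: subB rest
  | '%' :: c :: rest => c :: subB rest        -- %(.) → the captured character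
  | ['%'] => []                               -- %\Z → ""
  | c :: rest => c :: subB rest               -- a character outside any match is kept
  | [] => []

-- _TOKEN_RE.sub(_repl, fmt).strip()
def strftime_to_signature_py_alt (fmt : String) : String :=
  PySem.Str.strip (String.ofList (subB fmt.toList))

-- ===== PRECONDITION & SPEC =====
def Spec_strftime_to_signature_py (fmt : String) (out : String) : Prop := out = strftime_to_signature_py_alt fmt
instance (fmt : String) (out : String) : Decidable (Spec_strftime_to_signature_py fmt out) := by unfold Spec_strftime_to_signature_py; infer_instance

-- ===== CLAIM (what is proved, stated in full; the proofs are below) =====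
def Claim_equal_strftime_to_signature_py : Prop := ∀ (fmt : String), Dom_strftime_to_signature_py fmt → Spec_strftime_to_signature_py fmt (strftime_to_signature_py fmt)

-- ===== LEMMAS AND PROOFS =====
lemma fmtSpecMap_eq : fmtSpecMap = PySem.Dict.mk
  [("%Y", "YYYY"), ("%y", "YY"), ("%m", "MM"), ("%-m", "M"),
   ("%d", "DD"), ("%-d", "D"), ("%H", "HH"), ("%I", "hh"),
   ("%M", "mm"), ("%S", "ss"), ("%b", "MMM"), ("%B", "MMMM"),
   ("%a", "ddd"), ("%A", "dddd")] := by decide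

lemma get_mk_nil (k : String) : (PySem.Dict.mk ([] : List (String × String))).get? k = none := rfl

set_option maxHeartbeats 1000000 in
lemma get2_none (c : Char) (h : c ∉ (['Y','y','m','d','H','I','M','S','b','B','a','A'] : List Char)) :
    PySem.Dict.get? fmtSpecMap (String.ofList ['%', c]) = none := by
  simp at h
  obtain ⟨h1,h2,h3,h4,h5,h6,h7,h8,h9,h10,h11,h12⟩ := h
  rw [fmtSpecMap_eq]
  simp only [PySem.Dict.get?_mk_cons, beq_iff_eq, String.ext_iff, String.toList_ofList]
  simp [Ne.symm h1, Ne.symm h2, Ne.symm h3, Ne.symm h4, Ne.symm h5, Ne.symm h6,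
        Ne.symm h7, Ne.symm h8, Ne.symm h9, Ne.symm h10, Ne.symm h11, Ne.symm h12, get_mk_nil]

lemma get3_none (c : Char) (hm : c ≠ 'm') (hd : c ≠ 'd') :
    PySem.Dict.get? fmtSpecMap (String.ofList ['%', '-', c]) = none := by
  rw [fmtSpecMap_eq]
  simp only [PySem.Dict.get?_mk_cons, beq_iff_eq, String.ext_iff, String.toList_ofList]
  simp [Ne.symm hm, Ne.symm hd, get_mk_nil]

lemma join_nil_cons (p : List Char) (rest : List (List Char)) :
    PySem.Chars.join [] (p :: rest) = p ++ PySem.Chars.join [] rest := by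
  cases rest with
  | nil => simp [PySem.Chars.join_singleton, PySem.Chars.join_nil]
  | cons q r => rw [PySem.Chars.join_cons_cons]; simp

lemma subB_cons_ne (c : Char) (rest : List Char) (hp : c ≠ '%') :
    subB (c :: rest) = c :: subB rest := by
  rw [subB.eq_def]
  split <;> simp_all

lemma subB_pct_generic (c : Char) (rest : List Char)
    (h : c ∉ (['Y','y','m','d','H','I','M','S','b','B','a','A'] : List Char))
    (hdm : c = '-' → rest.head? ≠ some 'm') (hdd : c = '-' → rest.head? ≠ some 'd') :
    subB ('%' :: c :: rest) = c :: subB rest := by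
  simp at h
  rw [subB.eq_def]
  split <;> try simp_all
  rename_i hno _ heq
  exact absurd heq.2.symm (hno c rest heq.1.symm)

set_option maxHeartbeats 2000000 in
theorem joinA_eq_subB (l : List Char) :
    PySem.Chars.join [] ((loopA l).map String.toList) = subB l := by
  match l with
  | [] => simp [loopA, subB, PySem.Chars.join_nil]
  | c :: rest =>
    by_cases hp : c = '%'
    · subst hp
      match rest with
      | [] =>
        simp [loopA, subB, PySem.Chars.join_nil,
          show PySem.Dict.get? fmtSpecMap (String.ofList ['%']) = none from by decide]
      | c2 :: rest2 =>
        by_cases h2 : c2 ∈ (['Y','y','m','d','H','I','M','S','b','B','a','A'] : List Char)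
        · have IH := joinA_eq_subB rest2
          fin_cases h2 <;>
            simp_all [loopA, subB, join_nil_cons,
              show PySem.Dict.get? fmtSpecMap (String.ofList ['%','Y']) = some "YYYY" from by decide,
              show PySem.Dict.get? fmtSpecMap (String.ofList ['%','y']) = some "YY" from by decide,
              show PySem.Dict.get? fmtSpecMap (String.ofList ['%','m']) = some "MM" from by decide,
              show PySem.Dict.get? fmtSpecMap (String.ofList ['%','d']) = some "DD" from by decide,
              show PySem.Dict.get? fmtSpecMap (String.ofList ['%','H']) = some "HH" from by decide,
              show PySem.Dict.get? fmtSpecMap (String.ofList ['%','I']) = some "hh" from by decide,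
              show PySem.Dict.get? fmtSpecMap (String.ofList ['%','M']) = some "mm" from by decide,
              show PySem.Dict.get? fmtSpecMap (String.ofList ['%','S']) = some "ss" from by decide,
              show PySem.Dict.get? fmtSpecMap (String.ofList ['%','b']) = some "MMM" from by decide,
              show PySem.Dict.get? fmtSpecMap (String.ofList ['%','B']) = some "MMMM" from by decide,
              show PySem.Dict.get? fmtSpecMap (String.ofList ['%','a']) = some "ddd" from by decide,
              show PySem.Dict.get? fmtSpecMap (String.ofList ['%','A']) = some "dddd" from by decide]
        · by_cases hdash : c2 = '-'
          · subst hdash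
            match rest2 with
            | [] =>
              simp [loopA, subB,
                show PySem.Dict.get? fmtSpecMap (String.ofList ['%','-']) = none from by decide]
            | c3 :: rest3 =>
              by_cases h3m : c3 = 'm'
              · subst h3m
                simpa [loopA, subB, join_nil_cons,
                  show PySem.Dict.get? fmtSpecMap (String.ofList ['%','-']) = none from by decide,
                  show PySem.Dict.get? fmtSpecMap (String.ofList ['%','-','m']) = some "M" from by decide]
                  using joinA_eq_subB rest3
              · by_cases h3d : c3 = 'd'
                · subst h3d
                  simpa [loopA, subB, join_nil_cons,
                    show PySem.Dict.get? fmtSpecMap (String.ofList ['%','-']) = none from by decide,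
                    show PySem.Dict.get? fmtSpecMap (String.ofList ['%','-','d']) = some "D" from by decide]
                    using joinA_eq_subB rest3
                · rw [subB_pct_generic '-' (c3 :: rest3) (by decide)
                      (fun _ => by simpa using h3m) (fun _ => by simpa using h3d)]
                  simpa [loopA, join_nil_cons,
                    show PySem.Dict.get? fmtSpecMap (String.ofList ['%','-']) = none from by decide,
                    get3_none c3 h3m h3d] using joinA_eq_subB (c3 :: rest3)
          · rw [subB_pct_generic c2 rest2 h2 (fun h => absurd h hdash) (fun h => absurd h hdash)]
            simpa [loopA, join_nil_cons, get2_none c2 h2, hdash] using joinA_eq_subB rest2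
    · rw [subB_cons_ne c rest hp, loopA.eq_def]
      simpa [hp, join_nil_cons] using joinA_eq_subB rest
  termination_by l.length
  decreasing_by all_goals simp <;> omega

-- ===== VERDICT (by name: the statement is the Claim_ definition above) =====
theorem strftime_to_signature_py_spec : Claim_equal_strftime_to_signature_py := by
  intro fmt _
  unfold Spec_strftime_to_signature_py strftime_to_signature_py strftime_to_signature_py_alt
  have h : PySem.Str.join "" (loopA fmt.toList) = String.ofList (subB fmt.toList) :=
    String.ext_iff.mpr (by simp [PySem.Str.toList_join, joinA_eq_subB])
  rw [h]
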